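-- pv_equiv track=rewrite | github.com/Ade-Pyaar/New_POS_Tagging_App | utils.py | predict_pos
-- ===== SOURCE A (Python) =====
-- states = ['#', '$', "''", '(', ')', ',', '--s--', '.', ':', 'CC', 'CD', 'DT', 'EX', 'FW', 'IN', 'JJ',
--
--               'JJR', 'JJS', 'LS', 'MD', 'NN', 'NNP', 'NNPS', 'NNS', 'PDT', 'POS', 'PRP', 'PRP$', 'RB',
--
--               'RBR', 'RBS', 'RP', 'SYM', 'TO', 'UH', 'VB', 'VBD','VBG', 'VBN', 'VBP', 'VBZ', 'WDT',
--
--               'WP', 'WP$', 'WRB', '``']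
--
-- def predict_pos(prep, emission_counts, vocab):
--     '''
--     Input:
--         prep: a preprocessed sentence to predict POS for
--         emission_counts: a dictionary where the keys are (tag,word) tuples and the value is the count
--         vocab: a dictionary where keys are words in vocabulary and value is an index
--     Output:
--         tags: a list of POS tags for prep
--     '''
--
--
--     # Get the (tag, word) tuples, stored as a set
--     # all_words = set(emission_counts.keys())
--     pos_list = []
--
--     for word in prep:
--         count_final = 0
--         pos_final = ''
--
--         if word in vocab:
--             for pos in states:
--                 key = (pos, word)
--
--                 if key in emission_counts.keys():
--                     count = emission_counts[key]
--
--                     if count > count_final: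
--                         count_final = count
--                         pos_final = pos
--             pos_list.append(pos_final)
--
--     return pos_list
-- ===== SOURCE B (Python) =====
-- states = ['#', '$', "''", '(', ')', ',', '--s--', '.', ':', 'CC', 'CD', 'DT', 'EX', 'FW', 'IN', 'JJ',
--               'JJR', 'JJS', 'LS', 'MD', 'NN', 'NNP', 'NNPS', 'NNS', 'PDT', 'POS', 'PRP', 'PRP$', 'RB',
--               'RBR', 'RBS', 'RP', 'SYM', 'TO', 'UH', 'VB', 'VBD','VBG', 'VBN', 'VBP', 'VBZ', 'WDT',
--               'WP', 'WP$', 'WRB', '``']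
--
-- def predict_pos(prep, emission_counts, vocab):
--     # One pass over emission_counts builds, for every word, its best tag
--     # (largest positive count; ties broken by the earlier tag in states order),
--     # then one lookup pass over prep.
--     best = {}  # word -> (count, index of tag in states, tag)
--     for (pos, word), count in emission_counts.items():
--         if count <= 0 or pos not in states:
--             continue
--         i = states.index(pos)
--         cur = best.get(word)
--         if cur is None or count > cur[0] or (count == cur[0] and i < cur[1]):
--             best[word] = (count, i, pos)
--     tags = []
--     for word in prep:
--         if word in vocab:
--             tags.append(best[word][2] if word in best else '')
--     return tags
-- ===== Notes on version B (the rewrite author's own statement) =====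
-- stated objective: alternative
-- what changed: Instead of scanning all 46 states and probing the emission dict for each word of prep, B makes a single pass over emission_counts building a best-tag-per-word dict (max positive count, ties to the earlier tag in states order) and then a lookup pass over prep.
import Mathlib
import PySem

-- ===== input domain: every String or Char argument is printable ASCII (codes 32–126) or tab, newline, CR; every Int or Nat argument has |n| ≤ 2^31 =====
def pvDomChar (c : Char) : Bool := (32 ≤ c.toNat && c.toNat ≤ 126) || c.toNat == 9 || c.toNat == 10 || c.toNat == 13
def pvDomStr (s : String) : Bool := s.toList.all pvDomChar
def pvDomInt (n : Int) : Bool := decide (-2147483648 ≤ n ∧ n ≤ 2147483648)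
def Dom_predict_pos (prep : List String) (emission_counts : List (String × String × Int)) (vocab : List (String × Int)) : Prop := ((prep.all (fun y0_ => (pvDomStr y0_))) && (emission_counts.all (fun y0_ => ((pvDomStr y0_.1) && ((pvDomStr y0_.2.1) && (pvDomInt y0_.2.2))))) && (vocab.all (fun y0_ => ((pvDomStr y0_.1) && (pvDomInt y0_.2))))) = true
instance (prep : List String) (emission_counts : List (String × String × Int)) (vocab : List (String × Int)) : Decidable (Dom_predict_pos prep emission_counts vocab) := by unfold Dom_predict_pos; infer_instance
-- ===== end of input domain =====

-- B builds the best tag per word in ONE pass over emission_counts (plus a lookup pass over prep)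
-- instead of A's scan over all 46 states for every word of prep; return values agree on every
-- duplicate-key-free emission list (= every Python dict).

-- the module-level constant `states`, shared by both ports
def pyStates : List String := ["#", "$", "''", "(", ")", ",", "--s--", ".", ":", "CC", "CD", "DT", "EX", "FW", "IN", "JJ",
  "JJR", "JJS", "LS", "MD", "NN", "NNP", "NNPS", "NNS", "PDT", "POS", "PRP", "PRP$", "RB",
  "RBR", "RBS", "RP", "SYM", "TO", "UH", "VB", "VBD", "VBG", "VBN", "VBP", "VBZ", "WDT",
  "WP", "WP$", "WRB", "``"]

-- ===== PORT A =====
-- inner loop `for pos in states: …` (emission_counts is a dict keyed by (pos, word);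
-- `key in emission_counts.keys()` / `emission_counts[key]` = first matching entry, exact for a dict)
def pvAStep (emission_counts : List (String × String × Int)) (word : String) (acc : Int × String) (pos : String) : Int × String :=
  match emission_counts.find? (fun e => e.1 == pos && e.2.1 == word) with
  | some e => if e.2.2 > acc.1 then (e.2.2, pos) else acc
  | none => acc

def pvAInner (emission_counts : List (String × String × Int)) (word : String) : Int × String :=
  pyStates.foldl (pvAStep emission_counts word) (0, "")

def predict_pos (prep : List String) (emission_counts : List (String × String × Int)) (vocab : List (String × Int)) : List String :=
  prep.foldl (fun pos_list word =>
    if vocab.any (fun kv => kv.1 == word) then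
      pos_list ++ [(pvAInner emission_counts word).2]
    else pos_list) []

-- ===== PORT B =====
-- one step of B's single pass over emission_counts.items(); best maps word -> (count, states.index(pos), pos)
def pvBStep (best : PySem.Dict String (Int × Nat × String)) (e : String × String × Int) : PySem.Dict String (Int × Nat × String) :=
  if e.2.2 ≤ 0 then best
  else
    match PySem.List.index? pyStates e.1 with   -- `pos not in states` guard + `states.index(pos)` together
    | none => best
    | some i =>
      match best.get? e.2.1 with
      | none => best.insert e.2.1 (e.2.2, i, e.1)
      | some cur =>
        if cur.1 < e.2.2 ∨ (e.2.2 = cur.1 ∧ i < cur.2.1) then best.insert e.2.1 (e.2.2, i, e.1) else best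

def pvBBest (emission_counts : List (String × String × Int)) : PySem.Dict String (Int × Nat × String) :=
  emission_counts.foldl pvBStep PySem.Dict.empty

def predict_pos_alt (prep : List String) (emission_counts : List (String × String × Int)) (vocab : List (String × Int)) : List String :=
  let best := pvBBest emission_counts
  prep.foldl (fun tags word =>
    if vocab.any (fun kv => kv.1 == word) then
      tags ++ [match best.get? word with | some cur => cur.2.2 | none => ""]
    else tags) []

-- ===== PRECONDITION & SPEC =====
-- Pre_ excludes association lists with a duplicate (tag, word) key: those do not represent any
-- Python dict (A's input type), and A's first-binding reading vs B's every-entry reading of such a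
-- list legitimately differ.
def Pre_predict_pos (prep : List String) (emission_counts : List (String × String × Int)) (vocab : List (String × Int)) : Prop :=
  (emission_counts.map (fun e => (e.1, e.2.1))).Nodup

instance (prep : List String) (emission_counts : List (String × String × Int)) (vocab : List (String × Int)) : Decidable (Pre_predict_pos prep emission_counts vocab) := by unfold Pre_predict_pos; infer_instance

def pvWitness_predict_pos : List String × (List (String × String × Int)) × (List (String × Int)) :=
  (["the", "cat"], [("DT", "the", 3), ("NN", "the", 1), ("NN", "cat", 2)], [("the", 0), ("cat", 1)])

def Spec_predict_pos (prep : List String) (emission_counts : List (String × String × Int)) (vocab : List (String × Int)) (out : List String) : Prop := out = predict_pos_alt prep emission_counts vocab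
instance (prep : List String) (emission_counts : List (String × String × Int)) (vocab : List (String × Int)) (out : List String) : Decidable (Spec_predict_pos prep emission_counts vocab out) := by unfold Spec_predict_pos; infer_instance

-- ===== CLAIM (what is proved, stated in full; the proofs are below) =====
def Claim_equal_predict_pos : Prop := ∀ (prep : List String) (emission_counts : List (String × String × Int)) (vocab : List (String × Int)), Dom_predict_pos prep emission_counts vocab → Pre_predict_pos prep emission_counts vocab → Spec_predict_pos prep emission_counts vocab (predict_pos prep emission_counts vocab)


-- ===== LEMMAS AND PROOFS =====

theorem pvStatesNodup : pyStates.Nodup := by decide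

theorem pvIndexGetElem (l : List String) (h : l.Nodup) (k : Nat) (hk : k < l.length) :
    PySem.List.index? l l[k] = some k := by
  rw [PySem.List.index?_eq_some_iff]
  refine ⟨l.take k, l.drop (k+1), by simp [List.getElem_cons_drop], by simp [Nat.min_eq_left hk.le], ?_⟩
  intro hmem
  obtain ⟨j, hj, hje⟩ := List.mem_iff_getElem.mp hmem
  have hjk : j < k := lt_of_lt_of_le hj (by simp)
  have hjl : j < l.length := hjk.trans hk
  rw [List.getElem_take] at hje
  exact absurd ((List.Nodup.getElem_inj_iff h (hi := hjl) (hj := hk)).mp hje) (Nat.ne_of_lt hjk)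

-- a triple (c, i, p) "qualifies" for word w in the list l: l has entry (p, w, c), p sits at
-- position i of pyStates, and c is positive
def pvQual (l : List (String × String × Int)) (w : String) (c : Int) (i : Nat) (p : String) : Prop :=
  (p, (w, c)) ∈ l ∧ PySem.List.index? pyStates p = some i ∧ 0 < c

-- with no duplicate keys, the dict lookup of key (p, w) finds exactly the member entry
theorem pvFindMem (ec : List (String × String × Int))
    (hnd : (ec.map (fun e => (e.1, e.2.1))).Nodup) (p w : String) (c : Int)
    (hmem : (p, (w, c)) ∈ ec) : ec.find? (fun e => e.1 == p && e.2.1 == w) = some (p, (w, c)) := by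
  have hs : (ec.find? (fun e => e.1 == p && e.2.1 == w)).isSome :=
    List.find?_isSome.mpr ⟨(p, (w, c)), hmem, by simp⟩
  obtain ⟨e', he'⟩ := Option.isSome_iff_exists.mp hs
  have hm' := List.mem_of_find?_eq_some he'
  have hp' := List.find?_some he'
  simp only [Bool.and_eq_true, beq_iff_eq] at hp'
  have he : e' = (p, (w, c)) := by
    have := List.inj_on_of_nodup_map hnd hm' hmem (by simp [hp'.1, hp'.2])
    exact this
  rwa [he] at he'

-- B's fold, restricted to one word
def pvStepW (w : String) (acc : Option (Int × Nat × String)) (e : String × String × Int) : Option (Int × Nat × String) :=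
  if e.2.1 = w then
    (if e.2.2 ≤ 0 then acc
     else
       match PySem.List.index? pyStates e.1 with
       | none => acc
       | some i =>
         match acc with
         | none => some (e.2.2, i, e.1)
         | some cur => if cur.1 < e.2.2 ∨ (e.2.2 = cur.1 ∧ i < cur.2.1) then some (e.2.2, i, e.1) else acc)
  else acc

theorem pvFactor (w : String) : ∀ (l : List (String × String × Int)) (d : PySem.Dict String (Int × Nat × String)),
    (l.foldl pvBStep d).get? w = l.foldl (pvStepW w) (d.get? w) := by
  intro l
  induction l with
  | nil => intro d; rfl
  | cons e rest ih =>
    intro d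
    simp only [List.foldl_cons]
    rw [ih]
    congr 1
    unfold pvBStep pvStepW
    by_cases h0 : e.2.2 ≤ 0
    · simp [h0]
    · simp only [h0, if_false]
      cases hidx : PySem.List.index? pyStates e.1 with
      | none => simp
      | some i =>
        by_cases hw : e.2.1 = w
        · rw [← hw]
          cases hacc : d.get? e.2.1 with
          | none => simp [PySem.Dict.get?_insert_self]
          | some cur =>
            by_cases hc : cur.1 < e.2.2 ∨ (e.2.2 = cur.1 ∧ i < cur.2.1)
            · simp [hc, PySem.Dict.get?_insert_self]
            · simp [hc, hacc]
        · have hne : w ≠ e.2.1 := fun h => hw h.symm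
          cases hacc : d.get? e.2.1 with
          | none => simp [hw, PySem.Dict.get?_insert_of_ne _ _ hne]
          | some cur =>
            by_cases hc : cur.1 < e.2.2 ∨ (e.2.2 = cur.1 ∧ i < cur.2.1)
            · simp [hw, hc, PySem.Dict.get?_insert_of_ne _ _ hne]
            · simp [hw, hc]

-- B-side invariant: acc is the best qualifying triple seen so far (max count, then min index)
def pvBInv (seen : List (String × String × Int)) (w : String) (acc : Option (Int × Nat × String)) : Prop :=
  match acc with
  | none => ∀ c i p, ¬ pvQual seen w c i p
  | some (c, i, p) => pvQual seen w c i p ∧ ∀ c' i' p', pvQual seen w c' i' p' → (c' < c ∨ (c' = c ∧ i ≤ i'))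

theorem pvQualAppend (seen : List (String × String × Int)) (e : String × String × Int) (w : String)
    (c : Int) (i : Nat) (p : String) :
    pvQual (seen ++ [e]) w c i p ↔ pvQual seen w c i p ∨
      (e = (p, (w, c)) ∧ PySem.List.index? pyStates p = some i ∧ 0 < c) := by
  simp only [pvQual, List.mem_append, List.mem_singleton]
  constructor
  · rintro ⟨hm | hm, h2, h3⟩
    · exact Or.inl ⟨hm, h2, h3⟩
    · exact Or.inr ⟨hm.symm, h2, h3⟩
  · rintro (⟨hm, h2, h3⟩ | ⟨hm, h2, h3⟩)
    · exact ⟨Or.inl hm, h2, h3⟩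
    · exact ⟨Or.inr hm.symm, h2, h3⟩

theorem pvBInvStep (w : String) (seen : List (String × String × Int))
    (acc : Option (Int × Nat × String)) (e : String × String × Int)
    (h : pvBInv seen w acc) : pvBInv (seen ++ [e]) w (pvStepW w acc e) := by
  unfold pvStepW
  by_cases hw : e.2.1 = w
  · by_cases h0 : e.2.2 ≤ 0
    · simp only [hw, if_true, h0]
      cases acc with
      | none =>
        intro c i p hq
        rcases (pvQualAppend seen e w c i p).mp hq with hq | ⟨he, _, hc⟩
        · exact h c i p hq
        · rw [he] at h0; simp at h0; omega
      | some cur =>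
        obtain ⟨c, i, p⟩ := cur
        refine ⟨(pvQualAppend seen e w c i p).mpr (Or.inl h.1), ?_⟩
        intro c' i' p' hq
        rcases (pvQualAppend seen e w c' i' p').mp hq with hq | ⟨he, _, hc⟩
        · exact h.2 c' i' p' hq
        · rw [he] at h0; simp at h0; omega
    · simp only [hw, if_true, h0, if_false]
      cases hidx : PySem.List.index? pyStates e.1 with
      | none =>
        cases acc with
        | none =>
          intro c i p hq
          rcases (pvQualAppend seen e w c i p).mp hq with hq | ⟨he, hi, hc⟩
          · exact h c i p hq
          · rw [he] at hidx; simp only at hidx; rw [hidx] at hi; simp at hi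
        | some cur =>
          obtain ⟨c, i, p⟩ := cur
          refine ⟨(pvQualAppend seen e w c i p).mpr (Or.inl h.1), ?_⟩
          intro c' i' p' hq
          rcases (pvQualAppend seen e w c' i' p').mp hq with hq | ⟨he, hi, hc⟩
          · exact h.2 c' i' p' hq
          · rw [he] at hidx; simp only at hidx; rw [hidx] at hi; simp at hi
      | some i =>
        have heeq : e = (e.1, (w, e.2.2)) := by
          obtain ⟨e1, e2, e3⟩ := e; simp only at hw ⊢; rw [hw]
        have hqe : pvQual (seen ++ [e]) w e.2.2 i e.1 :=
          (pvQualAppend seen e w e.2.2 i e.1).mpr (Or.inr ⟨heeq, hidx, by omega⟩)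
        have hnewmax : ∀ c' i' p', (e = (p', (w, c')) ∧ PySem.List.index? pyStates p' = some i' ∧ 0 < c') →
            c' = e.2.2 ∧ i' = i := by
          intro c' i' p' ⟨he, hi, _⟩
          have h1 : p' = e.1 := by rw [he]
          have h2 : c' = e.2.2 := by rw [he]
          rw [h1, hidx] at hi
          exact ⟨h2, (Option.some.inj hi).symm⟩
        cases acc with
        | none =>
          refine ⟨hqe, ?_⟩
          intro c' i' p' hq
          rcases (pvQualAppend seen e w c' i' p').mp hq with hq | hnew
          · exact absurd hq (h c' i' p')
          · obtain ⟨h1, h2⟩ := hnewmax c' i' p' hnew; omega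
        | some cur =>
          obtain ⟨c, j, p⟩ := cur
          by_cases hc : c < e.2.2 ∨ (e.2.2 = c ∧ i < j)
          · simp only [hc, if_true]
            refine ⟨hqe, ?_⟩
            intro c' i' p' hq
            rcases (pvQualAppend seen e w c' i' p').mp hq with hq | hnew
            · have := h.2 c' i' p' hq; omega
            · obtain ⟨h1, h2⟩ := hnewmax c' i' p' hnew; omega
          · simp only [hc, if_false]
            refine ⟨(pvQualAppend seen e w c j p).mpr (Or.inl h.1), ?_⟩
            intro c' i' p' hq
            rcases (pvQualAppend seen e w c' i' p').mp hq with hq | hnew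
            · exact h.2 c' i' p' hq
            · obtain ⟨h1, h2⟩ := hnewmax c' i' p' hnew; omega
  · simp only [hw, if_false]
    cases acc with
    | none =>
      intro c i p hq
      rcases (pvQualAppend seen e w c i p).mp hq with hq | ⟨he, _, _⟩
      · exact h c i p hq
      · rw [he] at hw; simp at hw
    | some cur =>
      obtain ⟨c, i, p⟩ := cur
      refine ⟨(pvQualAppend seen e w c i p).mpr (Or.inl h.1), ?_⟩
      intro c' i' p' hq
      rcases (pvQualAppend seen e w c' i' p').mp hq with hq | ⟨he, _, _⟩
      · exact h.2 c' i' p' hq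
      · rw [he] at hw; simp at hw

theorem pvBInvFold (w : String) : ∀ (rest seen : List (String × String × Int)) (acc : Option (Int × Nat × String)),
    pvBInv seen w acc → pvBInv (seen ++ rest) w (rest.foldl (pvStepW w) acc) := by
  intro rest
  induction rest with
  | nil => intro seen acc h; simpa using h
  | cons e rest' ih =>
    intro seen acc h
    have h1 := pvBInvStep w seen acc e h
    have h2 := ih (seen ++ [e]) (pvStepW w acc e) h1
    simpa [List.append_assoc] using h2

-- A-side invariant after processing the first n states
def pvAInv (ec : List (String × String × Int)) (w : String) (n : Nat) (acc : Int × String) : Prop :=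
  (acc.1 = 0 ∧ acc.2 = "" ∧ ∀ c i p, pvQual ec w c i p → i < n → False)
  ∨ (0 < acc.1 ∧ ∃ i, i < n ∧ pvQual ec w acc.1 i acc.2 ∧
      ∀ c' i' p', pvQual ec w c' i' p' → i' < n → (c' < acc.1 ∨ (c' = acc.1 ∧ i ≤ i')))

-- any qualifying triple at position n names the state pyStates[n] and its unique ec entry
theorem pvQualAt (ec : List (String × String × Int)) (w : String)
    (hnd : (ec.map (fun e => (e.1, e.2.1))).Nodup) (n : Nat) (hn : n < pyStates.length)
    (c : Int) (p : String) (hq : pvQual ec w c n p) :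
    p = pyStates[n] ∧ ec.find? (fun e => e.1 == pyStates[n] && e.2.1 == w) = some (p, (w, c)) := by
  obtain ⟨hmem, hidx, hc⟩ := hq
  obtain ⟨hk, hp, _⟩ := PySem.List.getElem_of_index?_eq_some hidx
  subst hp
  exact ⟨rfl, pvFindMem ec hnd _ w c hmem⟩

theorem pvAInvStep (ec : List (String × String × Int)) (w : String)
    (hnd : (ec.map (fun e => (e.1, e.2.1))).Nodup) (n : Nat) (hn : n < pyStates.length)
    (acc : Int × String) (h : pvAInv ec w n acc) :
    pvAInv ec w (n + 1) (pvAStep ec w acc pyStates[n]) := by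
  unfold pvAStep
  cases hf : ec.find? (fun e => e.1 == pyStates[n] && e.2.1 == w) with
  | none =>
    have hno : ∀ c i p, pvQual ec w c i p → i = n → False := by
      intro c i p hq hi
      subst hi
      obtain ⟨_, hfind⟩ := pvQualAt ec w hnd i hn c p hq
      rw [hf] at hfind; simp at hfind
    rcases h with ⟨h1, h2, h3⟩ | ⟨h1, i, hi, hq, hmax⟩
    · exact Or.inl ⟨h1, h2, fun c i p hq hi => by
        rcases Nat.lt_succ_iff_lt_or_eq.mp hi with hi | hi
        · exact h3 c i p hq hi
        · exact hno c i p hq hi⟩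
    · refine Or.inr ⟨h1, i, Nat.lt_succ_of_lt hi, hq, ?_⟩
      intro c' i' p' hq' hi'
      rcases Nat.lt_succ_iff_lt_or_eq.mp hi' with hi' | hi'
      · exact hmax c' i' p' hq' hi'
      · exact absurd hi' (fun h => hno c' i' p' hq' h)
  | some e =>
    have hm := List.mem_of_find?_eq_some hf
    have hp := List.find?_some hf
    simp only [Bool.and_eq_true, beq_iff_eq] at hp
    have hidxn : PySem.List.index? pyStates e.1 = some n := by
      rw [hp.1]; exact pvIndexGetElem pyStates pvStatesNodup n hn
    have hatn : ∀ c i p, pvQual ec w c i p → i = n → c = e.2.2 := by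
      intro c i p hq hi
      subst hi
      obtain ⟨hpe, hfind⟩ := pvQualAt ec w hnd i hn c p hq
      rw [hf] at hfind
      have h2 := Option.some.inj hfind
      rw [h2]
    have hacc0 : 0 ≤ acc.1 := by
      rcases h with ⟨h1, _, _⟩ | ⟨h1, _⟩ <;> omega
    by_cases hgt : e.2.2 > acc.1
    · simp only [hgt, if_true]
      have heeq : e = (e.1, (w, e.2.2)) := by
        obtain ⟨e1, e2, e3⟩ := e; simp only at hp ⊢; rw [hp.2]
      have hqe : pvQual ec w e.2.2 n e.1 := ⟨by rw [← heeq]; exact hm, hidxn, by omega⟩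
      refine Or.inr ⟨by simp; omega, n, Nat.lt_succ_self n, by simpa [hp.1] using hqe, ?_⟩
      intro c' i' p' hq' hi'
      rcases Nat.lt_succ_iff_lt_or_eq.mp hi' with hi' | hi'
      · rcases h with ⟨h1, _, h3⟩ | ⟨h1, i, hi, hq, hmax⟩
        · exact absurd hi' (fun hlt => h3 c' i' p' hq' hlt)
        · have := hmax c' i' p' hq' hi'; simp only; omega
      · have := hatn c' i' p' hq' hi'; simp only; omega
    · simp only [hgt, if_false]
      rcases h with ⟨h1, h2, h3⟩ | ⟨h1, i, hi, hq, hmax⟩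
      · refine Or.inl ⟨h1, h2, ?_⟩
        intro c i p hq hi
        rcases Nat.lt_succ_iff_lt_or_eq.mp hi with hi | hi
        · exact h3 c i p hq hi
        · have := hatn c i p hq hi; obtain ⟨_, _, hcpos⟩ := hq; omega
      · refine Or.inr ⟨h1, i, Nat.lt_succ_of_lt hi, hq, ?_⟩
        intro c' i' p' hq' hi'
        rcases Nat.lt_succ_iff_lt_or_eq.mp hi' with hi' | hi'
        · exact hmax c' i' p' hq' hi'
        · have := hatn c' i' p' hq' hi'; omega

theorem pvAInvFold (ec : List (String × String × Int)) (w : String)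
    (hnd : (ec.map (fun e => (e.1, e.2.1))).Nodup) :
    ∀ (rest : List String) (n : Nat) (acc : Int × String), pyStates.drop n = rest → pvAInv ec w n acc →
      pvAInv ec w (n + rest.length) (rest.foldl (pvAStep ec w) acc) := by
  intro rest
  induction rest with
  | nil => intro n acc _ h; simpa using h
  | cons pos rest' ih =>
    intro n acc hdrop h
    have hn : n < pyStates.length := by
      by_contra hge
      rw [List.drop_eq_nil_of_le (by omega)] at hdrop
      simp at hdrop
    have hget : pyStates[n] = pos := by
      rw [List.drop_eq_getElem_cons hn] at hdrop
      exact (List.cons.inj hdrop).1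
    have hdrop' : pyStates.drop (n + 1) = rest' := by
      rw [List.drop_eq_getElem_cons hn] at hdrop
      exact (List.cons.inj hdrop).2
    have hstep := pvAInvStep ec w hnd n hn acc h
    rw [hget] at hstep
    have := ih (n + 1) (pvAStep ec w acc pos) hdrop' hstep
    simpa [Nat.add_comm, Nat.add_assoc, Nat.add_left_comm] using this

theorem pvPerWord (ec : List (String × String × Int)) (w : String)
    (hnd : (ec.map (fun e => (e.1, e.2.1))).Nodup) :
    (pvAInner ec w).2 = (match (pvBBest ec).get? w with | some cur => cur.2.2 | none => "") := by
  have hA : pvAInv ec w pyStates.length (pvAInner ec w) := by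
    have := pvAInvFold ec w hnd pyStates 0 (0, "") rfl
      (Or.inl ⟨rfl, rfl, fun c i p _ hi => absurd hi (Nat.not_lt_zero i)⟩)
    simpa [pvAInner] using this
  have hBfold : (pvBBest ec).get? w = ec.foldl (pvStepW w) none := by
    unfold pvBBest
    rw [pvFactor w ec PySem.Dict.empty, PySem.Dict.get?_empty]
  have hB : pvBInv ec w (ec.foldl (pvStepW w) none) := by
    have := pvBInvFold w ec [] none (fun c i p hq => by
      obtain ⟨hm, _, _⟩ := hq; exact absurd hm (List.not_mem_nil))
    simpa using this
  have hibound : ∀ (c : Int) (i : Nat) (p : String), pvQual ec w c i p → i < pyStates.length := by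
    intro c i p ⟨_, hidx, _⟩
    obtain ⟨hk, _, _⟩ := PySem.List.getElem_of_index?_eq_some hidx
    exact hk
  rw [hBfold]
  cases hres : ec.foldl (pvStepW w) none with
  | none =>
    rw [hres] at hB
    rcases hA with ⟨_, h2, _⟩ | ⟨_, i, _, hq, _⟩
    · simpa using h2
    · exact absurd hq (hB (pvAInner ec w).1 i (pvAInner ec w).2)
  | some cur =>
    obtain ⟨c, i, p⟩ := cur
    rw [hres] at hB
    obtain ⟨hqB, hmaxB⟩ := hB
    rcases hA with ⟨_, _, h3⟩ | ⟨h1, iA, hiA, hqA, hmaxA⟩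
    · exact absurd (hibound c i p hqB) (fun hlt => h3 c i p hqB hlt)
    · have hmA := hmaxA c i p hqB (hibound c i p hqB)
      have hmB := hmaxB (pvAInner ec w).1 iA (pvAInner ec w).2 hqA
      have hceq : c = (pvAInner ec w).1 ∧ i = iA := by omega
      obtain ⟨hidxp, _⟩ := hqB.2
      obtain ⟨hidxa, _⟩ := hqA.2
      rw [hceq.2] at hidxp
      obtain ⟨hk1, hg1, _⟩ := PySem.List.getElem_of_index?_eq_some hidxp
      obtain ⟨hk2, hg2, _⟩ := PySem.List.getElem_of_index?_eq_some hidxa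
      simp only
      rw [← hg1, hg2]

-- ===== VERDICT (by name: the statement is the Claim_ definition above) =====
theorem predict_pos_spec : Claim_equal_predict_pos := by
  intro prep ec vocab _ hpre
  unfold Spec_predict_pos predict_pos predict_pos_alt
  refine List.foldl_ext _ _ [] ?_
  intro tags word _
  by_cases hv : vocab.any (fun kv => kv.1 == word)
  · simp only [hv, if_true, pvPerWord ec word hpre]
  · simp [hv]
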